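-- pv_equiv track=rewrite | github.com/10639780/proti | testing/bab.py | direction_to_xy
-- ===== SOURCE A (Python) =====
-- def direction_to_xy(string):
--     """Converts a series of string with directions like ['L', 'R'] to lists with xy positions."""
--
--     pos_x = [0,1]
--     pos_y = [0,0]
--
--     # go over every node
--     for s in string:
--
--         # previous direction is determined
--         delta_x = pos_x[-1] - pos_x[-2]
--         delta_y = pos_y[-1] - pos_y[-2]
--
--         # rotation matrices used to turn into the desired direction
--         if s == 'S':
--             pos_x.append(pos_x[-1] + delta_x)
--             pos_y.append(pos_y[-1] + delta_y)
--
--         elif s == 'L':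
--             pos_x.append(pos_x[-1] - delta_y)
--             pos_y.append(pos_y[-1] + delta_x)
--
--         elif s == 'R':
--             pos_x.append(pos_x[-1] + delta_y )
--             pos_y.append(pos_y[-1] - delta_x)
--
--
--
--     return pos_x, pos_y
-- ===== SOURCE B (Python) =====
-- def direction_to_xy(string):
--     """Converts a series of string with directions like ['L', 'R'] to lists with xy positions."""
--     TURN = {'S': 0, 'L': 1, 'R': 3}
--     # stage 1: keep only the recognised moves, as quarter-turn counts
--     turns = [TURN[s] for s in string if s in TURN]
--     # stage 2: cumulative heading angle (quarter turns mod 4), starting east (0)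
--     angles = []
--     a = 0
--     for t in turns:
--         a = (a + t) % 4
--         angles.append(a)
--     # stage 3: heading-table walk producing the positions
--     DX = [1, 0, -1, 0]
--     DY = [0, 1, 0, -1]
--     xs = [0, 1]
--     ys = [0, 0]
--     for a in angles:
--         xs.append(xs[-1] + DX[a])
--         ys.append(ys[-1] + DY[a])
--     return xs, ys
-- ===== Notes on version B (the rewrite author's own statement) =====
-- stated objective: alternative
-- what changed: B is staged: it first maps the recognised characters to quarter-turn counts, then takes a cumulative sum mod 4 to get a list of heading angles, then walks a direction lookup table to build the positions, instead of A's single fused loop re-deriving the direction each step by subtracting the last two appended list entries via negative indexing.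
import Mathlib
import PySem

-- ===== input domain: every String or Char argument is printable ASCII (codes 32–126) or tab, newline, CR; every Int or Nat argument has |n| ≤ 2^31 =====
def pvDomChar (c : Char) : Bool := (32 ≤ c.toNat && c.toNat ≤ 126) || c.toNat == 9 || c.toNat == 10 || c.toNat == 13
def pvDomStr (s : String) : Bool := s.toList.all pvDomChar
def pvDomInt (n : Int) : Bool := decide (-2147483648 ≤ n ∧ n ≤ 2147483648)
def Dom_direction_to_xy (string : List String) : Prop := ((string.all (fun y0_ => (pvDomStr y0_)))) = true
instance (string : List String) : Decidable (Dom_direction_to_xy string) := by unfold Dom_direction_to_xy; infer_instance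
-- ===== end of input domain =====

-- B replaces A's fused turtle loop (re-deriving the direction from the last two appended
-- points) by three staged passes: chars → quarter-turn counts, cumulative angle mod 4,
-- then a heading-table walk; same O(n) cost, a genuinely different decomposition.

-- ===== PORT A =====
-- A's for-loop over `string`, carrying the two position lists; pos[-1]/pos[-2] are ported
-- with pyGetD _ _ 0, exact here because the lists always have ≥ 2 elements (seeded [0,1]/[0,0]).
def aLoop : List String → List Int → List Int → List Int × List Int
  | [], px, py => (px, py)
  | s :: rest, px, py =>
    let delta_x := PySem.List.pyGetD px (-1) 0 - PySem.List.pyGetD px (-2) 0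
    let delta_y := PySem.List.pyGetD py (-1) 0 - PySem.List.pyGetD py (-2) 0
    if s = "S" then
      aLoop rest (px ++ [PySem.List.pyGetD px (-1) 0 + delta_x]) (py ++ [PySem.List.pyGetD py (-1) 0 + delta_y])
    else if s = "L" then
      aLoop rest (px ++ [PySem.List.pyGetD px (-1) 0 - delta_y]) (py ++ [PySem.List.pyGetD py (-1) 0 + delta_x])
    else if s = "R" then
      aLoop rest (px ++ [PySem.List.pyGetD px (-1) 0 + delta_y]) (py ++ [PySem.List.pyGetD py (-1) 0 - delta_x])
    else
      aLoop rest px py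

def direction_to_xy (string : List String) : List Int × List Int :=
  aLoop string [0, 1] [0, 0]

-- ===== PORT B =====
-- Source B stage 1: the TURN dict and the filtering comprehension
-- (`TURN[s]` is guarded by `s in TURN`, so getD _ _ 0 is exact here).
def pvTURN : PySem.Dict String Int := PySem.Dict.ofList [("S", 0), ("L", 1), ("R", 3)]

def turnsOf (string : List String) : List Int :=
  (string.filter (fun s => PySem.Dict.contains pvTURN s)).map (fun s => PySem.Dict.getD pvTURN s 0)

-- Source B stage 2: cumulative heading angle mod 4 (the loop appending to `angles`)
def anglesLoop : List Int → Int → List Int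
  | [], _ => []
  | t :: ts, a =>
    let a' := PySem.Int.mod (a + t) 4
    a' :: anglesLoop ts a'

-- Source B stage 3: the heading lookup tables and the position-building loop
def pvDX : List Int := [1, 0, -1, 0]
def pvDY : List Int := [0, 1, 0, -1]

def posLoop : List Int → List Int → List Int → List Int × List Int
  | [], xs, ys => (xs, ys)
  | a :: rest, xs, ys =>
    posLoop rest (xs ++ [PySem.List.pyGetD xs (-1) 0 + PySem.List.pyGetD pvDX a 0])
                 (ys ++ [PySem.List.pyGetD ys (-1) 0 + PySem.List.pyGetD pvDY a 0])

def direction_to_xy_alt (string : List String) : List Int × List Int :=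
  posLoop (anglesLoop (turnsOf string) 0) [0, 1] [0, 0]

-- ===== PRECONDITION & SPEC =====
def Spec_direction_to_xy (string : List String) (out : List Int × List Int) : Prop := out = direction_to_xy_alt string
instance (string : List String) (out : List Int × List Int) : Decidable (Spec_direction_to_xy string out) := by unfold Spec_direction_to_xy; infer_instance

-- ===== CLAIM (what is proved, stated in full; the proofs are below) =====
def Claim_equal_direction_to_xy : Prop := ∀ (string : List String), Dom_direction_to_xy string → Spec_direction_to_xy string (direction_to_xy string)

-- ===== LEMMAS AND PROOFS =====

lemma pyGetD_neg_two_append (xs : List Int) (v d : Int) (h : xs ≠ []) :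
    PySem.List.pyGetD (xs ++ [v]) (-2) d = PySem.List.pyGetD xs (-1) d := by
  have hlen : 0 < xs.length := List.length_pos_iff.mpr h
  rw [PySem.List.pyGetD_neg_ofNat (xs ++ [v]) 2 d (by omega) (by simp; omega)]
  rw [PySem.List.pyGetD_neg_one xs d h]
  have : xs.length + 1 - 2 = xs.length - 1 := by omega
  simp only [List.length_append, List.length_cons, List.length_nil, this]
  rw [List.getElem_append_left (by omega)]
  exact (List.getLast_eq_getElem h).symm

-- rotation facts for the angle table (a ranges over the four headings)
lemma rotS (a : Int) (h0 : 0 ≤ a) (h4 : a < 4) : PySem.Int.mod a 4 = a := by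
  interval_cases a <;> decide

lemma rotL (a : Int) (h0 : 0 ≤ a) (h4 : a < 4) :
    PySem.List.pyGetD pvDX (PySem.Int.mod (a + 1) 4) 0 = -(PySem.List.pyGetD pvDY a 0) ∧
    PySem.List.pyGetD pvDY (PySem.Int.mod (a + 1) 4) 0 = PySem.List.pyGetD pvDX a 0 := by
  interval_cases a <;> exact ⟨by decide, by decide⟩

lemma rotR (a : Int) (h0 : 0 ≤ a) (h4 : a < 4) :
    PySem.List.pyGetD pvDX (PySem.Int.mod (a + 3) 4) 0 = PySem.List.pyGetD pvDY a 0 ∧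
    PySem.List.pyGetD pvDY (PySem.Int.mod (a + 3) 4) 0 = -(PySem.List.pyGetD pvDX a 0) := by
  interval_cases a <;> exact ⟨by decide, by decide⟩

-- the relation between A's list state and B's heading angle
def StInv (px py : List Int) (a : Int) : Prop :=
  2 ≤ px.length ∧ 2 ≤ py.length ∧ 0 ≤ a ∧ a < 4 ∧
  PySem.List.pyGetD px (-1) 0 - PySem.List.pyGetD px (-2) 0 = PySem.List.pyGetD pvDX a 0 ∧
  PySem.List.pyGetD py (-1) 0 - PySem.List.pyGetD py (-2) 0 = PySem.List.pyGetD pvDY a 0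

lemma inv_step (px py : List Int) (a' : Int) (h1 : 2 ≤ px.length) (h2 : 2 ≤ py.length)
    (h0 : 0 ≤ a') (h4 : a' < 4) :
    StInv (px ++ [PySem.List.pyGetD px (-1) 0 + PySem.List.pyGetD pvDX a' 0])
          (py ++ [PySem.List.pyGetD py (-1) 0 + PySem.List.pyGetD pvDY a' 0]) a' := by
  refine ⟨by simp; omega, by simp; omega, h0, h4, ?_, ?_⟩
  · rw [PySem.List.pyGetD_neg_one_append_singleton,
        pyGetD_neg_two_append px _ _ (by intro hc; simp [hc] at h1)]
    ring
  · rw [PySem.List.pyGetD_neg_one_append_singleton,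
        pyGetD_neg_two_append py _ _ (by intro hc; simp [hc] at h2)]
    ring

lemma turnsOf_cons_other (s : String) (rest : List String)
    (hS : s ≠ "S") (hL : s ≠ "L") (hR : s ≠ "R") :
    turnsOf (s :: rest) = turnsOf rest := by
  have hit : pvTURN.items = [("S", (0:Int)), ("L", 1), ("R", 3)] := by decide
  have hc : PySem.Dict.contains pvTURN s = false := by
    simp [PySem.Dict.contains, hit]
    exact ⟨fun x => hS x.symm, fun x => hL x.symm, fun x => hR x.symm⟩
  simp [turnsOf, hc]

lemma loop_eq (l : List String) : ∀ (px py : List Int) (a : Int),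
    StInv px py a → aLoop l px py = posLoop (anglesLoop (turnsOf l) a) px py := by
  induction l with
  | nil => intro px py a _; rfl
  | cons s rest ih =>
    intro px py a h
    obtain ⟨h1, h2, h0, h4, hx, hy⟩ := h
    have hm0 : ∀ b : Int, 0 ≤ PySem.Int.mod b 4 := fun b => PySem.Int.mod_nonneg b (by omega)
    have hm4 : ∀ b : Int, PySem.Int.mod b 4 < 4 := fun b => PySem.Int.mod_lt b (by omega)
    by_cases hS : s = "S"
    · subst hS
      have ht : turnsOf ("S" :: rest) = 0 :: turnsOf rest := by
        simp [turnsOf, (by decide : pvTURN.contains "S" = true),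
              (by decide : pvTURN.getD "S" 0 = (0 : Int))]
      rw [ht]
      simp only [aLoop, anglesLoop, posLoop, reduceIte]
      have ha0 : PySem.Int.mod (a + 0) 4 = a := by rw [add_zero]; exact rotS a h0 h4
      rw [ha0, hx, hy]
      exact ih _ _ _ (inv_step px py a h1 h2 h0 h4)
    · by_cases hL : s = "L"
      · subst hL
        have ht : turnsOf ("L" :: rest) = 1 :: turnsOf rest := by
          simp [turnsOf, (by decide : pvTURN.contains "L" = true),
                (by decide : pvTURN.getD "L" 0 = (1 : Int))]
        rw [ht]
        simp only [aLoop, anglesLoop, posLoop, reduceIte]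
        obtain ⟨rdx, rdy⟩ := rotL a h0 h4
        have st := inv_step px py (PySem.Int.mod (a + 1) 4) h1 h2 (hm0 _) (hm4 _)
        rw [rdx, rdy, ← sub_eq_add_neg] at st
        rw [rdx, rdy, ← sub_eq_add_neg, hx, hy]
        exact ih _ _ _ st
      · by_cases hR : s = "R"
        · subst hR
          have ht : turnsOf ("R" :: rest) = 3 :: turnsOf rest := by
            simp [turnsOf, (by decide : pvTURN.contains "R" = true),
                  (by decide : pvTURN.getD "R" 0 = (3 : Int))]
          rw [ht]
          simp only [aLoop, anglesLoop, posLoop, reduceIte]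
          obtain ⟨rdx, rdy⟩ := rotR a h0 h4
          have st := inv_step px py (PySem.Int.mod (a + 3) 4) h1 h2 (hm0 _) (hm4 _)
          rw [rdx, rdy, ← sub_eq_add_neg] at st
          rw [rdx, rdy, ← sub_eq_add_neg, hx, hy]
          exact ih _ _ _ st
        · rw [turnsOf_cons_other s rest hS hL hR]
          simp only [aLoop, if_neg hS, if_neg hL, if_neg hR]
          exact ih _ _ _ ⟨h1, h2, h0, h4, hx, hy⟩

-- ===== VERDICT (by name: the statement is the Claim_ definition above) =====
theorem direction_to_xy_spec : Claim_equal_direction_to_xy := by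
  intro string _
  unfold Spec_direction_to_xy direction_to_xy direction_to_xy_alt
  exact loop_eq string [0,1] [0,0] 0 ⟨by decide, by decide, by decide, by decide, by decide, by decide⟩
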